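-- pv_equiv track=rewrite | github.com/kirk-sayre-work/xlmulator | XLM/compute_decode_keys.py | _group_by_decode_key
-- ===== SOURCE A (Python) =====
-- def _group_by_decode_key(decode_key_cells, compute_exprs):
--
--     # Group the expressions that use the same decode key.
--     grouped_exprs = {}
--     for decode_key in decode_key_cells:
--         if (decode_key not in grouped_exprs):
--             grouped_exprs[decode_key] = set()
--         for expr in compute_exprs:
--             if ((decode_key == expr[0]) or (decode_key == expr[2])):
--                 grouped_exprs[decode_key].add(expr)
--
--     # Done.
--     return grouped_exprs
-- ===== SOURCE B (Python) =====
-- def _group_by_decode_key(decode_key_cells, compute_exprs):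
--     # No decode keys: nothing to group.
--     if not decode_key_cells:
--         return {}
--     # Index each expression once under its position-0 value and, when present,
--     # its position-2 value; then answer every decode key by a single lookup
--     # (O(K+E) instead of O(K*E)).
--     index = {}
--     for expr in compute_exprs:
--         positions = [expr[0]]
--         if len(expr) >= 3:
--             positions.append(expr[2])
--         for pos in positions:
--             index.setdefault(pos, set()).add(expr)
--     return {key: index.get(key, set()) for key in decode_key_cells}
-- ===== Notes on version B (the rewrite author's own statement) =====
-- stated objective: faster
-- what changed: Instead of scanning all expressions once per decode key, B indexes each expression once under its position-0 value (and its position-2 value when the expression has one) and answers every key by a single dictionary lookup; Pre_ excludes exactly the inputs where A raises IndexError (a nonempty key list together with an empty expression, or an expression shorter than 3 whose first entry differs from some key).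
import Mathlib
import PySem

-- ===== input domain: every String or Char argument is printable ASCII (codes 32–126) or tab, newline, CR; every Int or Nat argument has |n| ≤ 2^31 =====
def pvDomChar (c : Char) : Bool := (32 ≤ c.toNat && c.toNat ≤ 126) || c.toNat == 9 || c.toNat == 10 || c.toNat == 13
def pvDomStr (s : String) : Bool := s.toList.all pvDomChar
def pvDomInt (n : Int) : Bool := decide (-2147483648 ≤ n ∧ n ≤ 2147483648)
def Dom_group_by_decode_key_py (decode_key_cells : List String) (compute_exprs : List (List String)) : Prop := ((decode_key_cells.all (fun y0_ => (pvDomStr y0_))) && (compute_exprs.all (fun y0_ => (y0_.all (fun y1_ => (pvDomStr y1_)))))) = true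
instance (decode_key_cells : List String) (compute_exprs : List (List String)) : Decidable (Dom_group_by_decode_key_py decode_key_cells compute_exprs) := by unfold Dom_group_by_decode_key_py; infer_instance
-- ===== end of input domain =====

-- B replaces A's per-key scan of all expressions by a one-pass index keyed on each
-- expression's position-0 (and, when present, position-2) value, then one lookup per
-- decode key (objective: faster).

-- ===== PORT A =====
-- literal transliteration: dict of sets, outer loop over keys, inner scan over exprs;
-- `grouped_exprs[decode_key].add(expr)` is Dict.modify (the key is always present here).
def group_by_decode_key_py (decode_key_cells : List String) (compute_exprs : List (List String)) : List (String × List (List String)) :=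
  (decode_key_cells.foldl (fun g k =>
    let g1 := if g.contains k then g else g.insert k PySem.Set.empty
    compute_exprs.foldl (fun g2 e =>
      if (PySem.List.pyGet? e 0 == some k) || (PySem.List.pyGet? e 2 == some k) then
        PySem.Dict.modify g2 k PySem.Set.empty (fun s => PySem.Set.add s e)
      else g2) g1) PySem.Dict.empty).items

-- ===== PORT B =====
-- positions = [expr[0]] (+ [expr[2]] when len(expr) >= 3); Pre_ guarantees expr is
-- nonempty whenever this loop runs (the key list is nonempty), so pyGetD is exact here
def pvPositions (e : List String) : List String :=
  [PySem.List.pyGetD e 0 ""] ++ (if 3 ≤ e.length then [PySem.List.pyGetD e 2 ""] else [])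

-- `index.setdefault(pos, set()).add(expr)` is Dict.modify (ensure key, then add).
def pvIndex (compute_exprs : List (List String)) : PySem.Dict String (PySem.Set (List String)) :=
  compute_exprs.foldl (fun d e =>
    (pvPositions e).foldl (fun d2 p =>
      PySem.Dict.modify d2 p PySem.Set.empty (fun s => PySem.Set.add s e)) d) PySem.Dict.empty

def group_by_decode_key_py_alt (decode_key_cells : List String) (compute_exprs : List (List String)) : List (String × List (List String)) :=
  if decode_key_cells = [] then []
  else
    let index := pvIndex compute_exprs
    (decode_key_cells.foldl (fun d k =>
      d.insert k (PySem.Dict.getD index k PySem.Set.empty)) PySem.Dict.empty).items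

-- ===== PRECONDITION & SPEC =====
-- Pre_ excludes exactly the inputs where A raises IndexError: a nonempty key list
-- together with some empty expression, or with some expression shorter than 3 entries
-- whose first entry differs from some key (then A's `expr[2]` is evaluated and raises).
def Pre_group_by_decode_key_py (decode_key_cells : List String) (compute_exprs : List (List String)) : Prop :=
  decode_key_cells = [] ∨
    ∀ e ∈ compute_exprs, 1 ≤ e.length ∧
      (e.length < 3 → ∀ k ∈ decode_key_cells, k = e.headD "")
instance (decode_key_cells : List String) (compute_exprs : List (List String)) : Decidable (Pre_group_by_decode_key_py decode_key_cells compute_exprs) := by unfold Pre_group_by_decode_key_py; infer_instance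
def pvWitness_group_by_decode_key_py : List String × List (List String) :=
  (["a", "b"], [["a", "x", "b"], ["c", "y", "a"], ["b", "z", "b"]])

def Spec_group_by_decode_key_py (decode_key_cells : List String) (compute_exprs : List (List String)) (out : List (String × List (List String))) : Prop := out = group_by_decode_key_py_alt decode_key_cells compute_exprs
instance (decode_key_cells : List String) (compute_exprs : List (List String)) (out : List (String × List (List String))) : Decidable (Spec_group_by_decode_key_py decode_key_cells compute_exprs out) := by unfold Spec_group_by_decode_key_py; infer_instance

-- ===== CLAIM (what is proved, stated in full; the proofs are below) =====
def Claim_equal_group_by_decode_key_py : Prop := ∀ (decode_key_cells : List String) (compute_exprs : List (List String)), Dom_group_by_decode_key_py decode_key_cells compute_exprs → Pre_group_by_decode_key_py decode_key_cells compute_exprs → Spec_group_by_decode_key_py decode_key_cells compute_exprs (group_by_decode_key_py decode_key_cells compute_exprs)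

-- ===== LEMMAS AND PROOFS =====

-- the value B (and, on Pre_, A) associates with key k
def pvV (compute_exprs : List (List String)) (k : String) : PySem.Set (List String) :=
  PySem.Set.ofList (compute_exprs.filter (fun e => (pvPositions e).contains k))

theorem pv_foldl_add_absorb (l : List (List String)) (s : PySem.Set (List String))
    (h : ∀ x ∈ l, x ∈ s) : l.foldl PySem.Set.add s = s := by
  induction l with
  | nil => rfl
  | cons x l ih =>
    have hx : PySem.Set.add s x = s := by
      have hc : s.contains x = true := (PySem.Set.contains_iff _ _).mpr (h x (by simp))
      rw [PySem.Set.add, if_pos hc]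
    simp only [List.foldl_cons, hx]
    exact ih (fun y hy => h y (by simp [hy]))

-- B's index step (the fold over an expression's position list), seen through getD at one key
theorem pv_step_getD (ps : List String) (acc : PySem.Dict String (PySem.Set (List String)))
    (e : List String) (k : String) :
    ((ps.foldl (fun d2 p =>
        PySem.Dict.modify d2 p PySem.Set.empty (fun s => PySem.Set.add s e)) acc).getD k PySem.Set.empty)
      = if ps.contains k then PySem.Set.add (acc.getD k PySem.Set.empty) e
        else acc.getD k PySem.Set.empty := by
  induction ps generalizing acc with
  | nil => simp
  | cons p ps ih =>
    simp only [List.foldl_cons]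
    rw [ih]
    by_cases hk : k = p
    · subst hk
      by_cases hm : ps.contains k <;>
        simp [List.contains_eq_mem]
    · by_cases hm : ps.contains k <;>
        simp_all [PySem.Dict.getD_modify, List.contains_eq_mem]

theorem pv_index_getD (compute_exprs : List (List String))
    (acc : PySem.Dict String (PySem.Set (List String))) (k : String) :
    (compute_exprs.foldl (fun d e =>
        (pvPositions e).foldl (fun d2 p =>
          PySem.Dict.modify d2 p PySem.Set.empty (fun s => PySem.Set.add s e)) d) acc).getD k PySem.Set.empty
      = (compute_exprs.filter (fun e => (pvPositions e).contains k)).foldl PySem.Set.add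
          (acc.getD k PySem.Set.empty) := by
  induction compute_exprs generalizing acc with
  | nil => rfl
  | cons e l ih =>
    simp only [List.foldl_cons]
    rw [ih]
    by_cases h : (pvPositions e).contains k
    · rw [List.filter_cons_of_pos (by simpa using h)]
      simp only [List.foldl_cons, pv_step_getD, if_pos h]
    · rw [List.filter_cons_of_neg (by simpa using h)]
      rw [pv_step_getD, if_neg h]

theorem pv_getD_pvIndex (compute_exprs : List (List String)) (k : String) :
    (pvIndex compute_exprs).getD k PySem.Set.empty = pvV compute_exprs k := by
  rw [pvIndex, pv_index_getD]
  simp [pvV, PySem.Set.ofList_eq_foldl, PySem.Dict.getD_empty]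

-- inserting back the value already stored is the identity
theorem pv_insert_getD_self (g : PySem.Dict String (PySem.Set (List String))) (k : String)
    (hc : g.contains k = true) (hnd : g.keys.Nodup) :
    g.insert k (g.getD k PySem.Set.empty) = g := by
  have hsome : (PySem.Dict.get? g k).isSome := by
    rw [← PySem.Dict.contains_eq_isSome_get?]; exact hc
  obtain ⟨v, hv⟩ := Option.isSome_iff_exists.mp hsome
  apply PySem.Dict.ext
  rw [PySem.Dict.getD_of_get?_eq_some g PySem.Set.empty hv, PySem.Dict.items_insert_of_contains g v hc]
  conv_rhs => rw [← List.map_id g.items]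
  apply List.map_congr_left
  intro p hp
  by_cases hk : (p.1 == k) = true
  · have hk' : p.1 = k := by simpa using hk
    have hget : g.get? k = some p.2 := by
      have := PySem.Dict.get?_of_mem_items g (k := p.1) (v := p.2) (by simpa using hp) hnd
      rwa [hk'] at this
    have hv2 : p.2 = v := by
      rw [hget] at hv
      exact Option.some_inj.mp hv
    simp only [id_eq, if_pos hk]
    rw [← hk', ← hv2]
  · simp [hk]

-- A's inner scan over the expressions, at a key already present in the dict
theorem pv_innerA (l : List (List String)) (g : PySem.Dict String (PySem.Set (List String)))
    (k : String) (hc : g.contains k = true) (hnd : g.keys.Nodup) :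
    l.foldl (fun g2 e =>
        if (PySem.List.pyGet? e 0 == some k) || (PySem.List.pyGet? e 2 == some k) then
          PySem.Dict.modify g2 k PySem.Set.empty (fun s => PySem.Set.add s e)
        else g2) g
      = g.insert k ((l.filter (fun e =>
          (PySem.List.pyGet? e 0 == some k) || (PySem.List.pyGet? e 2 == some k))).foldl
            PySem.Set.add (g.getD k PySem.Set.empty)) := by
  induction l generalizing g with
  | nil => simpa using (pv_insert_getD_self g k hc hnd).symm
  | cons e l ih =>
    by_cases h : ((PySem.List.pyGet? e 0 == some k) || (PySem.List.pyGet? e 2 == some k)) = true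
    · rw [List.filter_cons, if_pos h]
      simp only [List.foldl_cons, if_pos h]
      have hmod : (PySem.Dict.modify g k PySem.Set.empty fun s => PySem.Set.add s e)
          = g.insert k (PySem.Set.add (g.getD k PySem.Set.empty) e) := rfl
      rw [hmod, ih (g.insert k (PySem.Set.add (g.getD k PySem.Set.empty) e))
            (PySem.Dict.contains_insert_self _ _ _) (PySem.Dict.nodup_keys_insert _ _ _ hnd),
          PySem.Dict.insert_insert_self, PySem.Dict.getD_insert_self]
    · rw [List.filter_cons, if_neg h]
      simp only [List.foldl_cons, if_neg h]
      exact ih g hc hnd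

-- on admitted inputs, A's match test agrees with B's position list
theorem pv_match_eq (e : List String) (k : String) (h1 : 1 ≤ e.length)
    (h3 : e.length < 3 → k = e.headD "") :
    ((PySem.List.pyGet? e 0 == some k) || (PySem.List.pyGet? e 2 == some k))
      = (pvPositions e).contains k := by
  match e with
  | [] => simp at h1
  | [a] =>
    have hk : k = a := h3 (by simp)
    subst hk
    simp [pvPositions, PySem.List.pyGet?, PySem.List.pyIdx?, PySem.List.pyGetD]
  | [a, b] =>
    have hk : k = a := h3 (by simp)
    subst hk
    simp [pvPositions, PySem.List.pyGet?, PySem.List.pyIdx?, PySem.List.pyGetD]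
  | a :: b :: c :: r =>
    have h0 : (0 : Int) ≤ (r.length : Int) + 1 + 1 := by omega
    have h2 : (2 : Int) ≤ (r.length : Int) + 1 + 1 := by omega
    have e0 : PySem.List.pyGet? (a :: b :: c :: r) 0 = some a := by
      simp [PySem.List.pyGet?, PySem.List.pyIdx?, h0]
    have e2 : PySem.List.pyGet? (a :: b :: c :: r) 2 = some c := by
      simp [PySem.List.pyGet?, PySem.List.pyIdx?, h2]
    have p0 : PySem.List.pyGetD (a :: b :: c :: r) 0 "" = a := by
      simp [PySem.List.pyGetD, e0]
    have p2 : PySem.List.pyGetD (a :: b :: c :: r) 2 "" = c := by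
      simp [PySem.List.pyGetD, e2]
    have hlen : 3 ≤ (a :: b :: c :: r).length := by simp
    rw [pvPositions, if_pos hlen, p0, p2, e0, e2]
    by_cases hka : k = a <;> by_cases hkc : k = c <;>
      simp [List.contains_eq_mem, hka, hkc]
    exact ⟨fun h' => hka h'.symm, fun h' => hkc h'.symm⟩

-- A's step at key k rewrites to B's unconditional insert of the indexed value
theorem pv_stepA_eq (compute_exprs : List (List String)) (k : String)
    (g : PySem.Dict String (PySem.Set (List String))) (hnd : g.keys.Nodup)
    (hinv : ∀ p ∈ g.items, p.2 = pvV compute_exprs p.1)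
    (hk : ∀ e ∈ compute_exprs, 1 ≤ e.length ∧ (e.length < 3 → k = e.headD "")) :
    (compute_exprs.foldl (fun g2 e =>
        if (PySem.List.pyGet? e 0 == some k) || (PySem.List.pyGet? e 2 == some k) then
          PySem.Dict.modify g2 k PySem.Set.empty (fun s => PySem.Set.add s e)
        else g2) (if g.contains k then g else g.insert k PySem.Set.empty))
      = g.insert k (pvV compute_exprs k) := by
  have hfilter : compute_exprs.filter (fun e =>
      (PySem.List.pyGet? e 0 == some k) || (PySem.List.pyGet? e 2 == some k))
      = compute_exprs.filter (fun e => (pvPositions e).contains k) :=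
    List.filter_congr (fun e he => pv_match_eq e k (hk e he).1 (hk e he).2)
  by_cases hc : g.contains k
  · rw [if_pos hc, pv_innerA _ _ _ hc hnd, hfilter]
    have hsome : (PySem.Dict.get? g k).isSome := by
      rw [← PySem.Dict.contains_eq_isSome_get?]; exact hc
    obtain ⟨v, hv⟩ := Option.isSome_iff_exists.mp hsome
    have hval : g.getD k PySem.Set.empty = pvV compute_exprs k := by
      rw [PySem.Dict.getD_of_get?_eq_some g PySem.Set.empty hv]
      exact hinv (k, v) (PySem.Dict.mem_items_of_get?_eq_some g hv)
    rw [hval, pv_foldl_add_absorb]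
    intro x hx
    exact (PySem.Set.mem_ofList _ _).mpr hx
  · rw [if_neg hc]
    rw [pv_innerA compute_exprs (g.insert k PySem.Set.empty) k
          (PySem.Dict.contains_insert_self _ _ _) (PySem.Dict.nodup_keys_insert _ _ _ hnd)]
    rw [PySem.Dict.insert_insert_self, PySem.Dict.getD_insert_self, hfilter]
    rw [pvV, PySem.Set.ofList_eq_foldl]
    rfl

-- main induction: both outer folds agree
theorem pv_main (compute_exprs : List (List String)) (keys : List String)
    (g : PySem.Dict String (PySem.Set (List String))) (hnd : g.keys.Nodup)
    (hinv : ∀ p ∈ g.items, p.2 = pvV compute_exprs p.1)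
    (hpre : ∀ e ∈ compute_exprs, 1 ≤ e.length ∧ (e.length < 3 → ∀ k ∈ keys, k = e.headD "")) :
    keys.foldl (fun g k =>
        let g1 := if g.contains k then g else g.insert k PySem.Set.empty
        compute_exprs.foldl (fun g2 e =>
          if (PySem.List.pyGet? e 0 == some k) || (PySem.List.pyGet? e 2 == some k) then
            PySem.Dict.modify g2 k PySem.Set.empty (fun s => PySem.Set.add s e)
          else g2) g1) g
      = keys.foldl (fun d k => d.insert k (pvV compute_exprs k)) g := by
  induction keys generalizing g with
  | nil => rfl
  | cons k keys ih =>
    simp only [List.foldl_cons]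
    rw [pv_stepA_eq compute_exprs k g hnd hinv
          (fun e he => ⟨(hpre e he).1, fun hl => (hpre e he).2 hl k (by simp)⟩)]
    apply ih
    · exact PySem.Dict.nodup_keys_insert _ _ _ hnd
    · intro p hp
      rcases (PySem.Dict.mem_items_insert _ _ _ _).mp hp with h | ⟨h, _⟩
      · rw [h]
      · exact hinv p h
    · intro e he
      exact ⟨(hpre e he).1, fun hl k' hk' => (hpre e he).2 hl k' (by simp [hk'])⟩

-- ===== VERDICT (by name: the statement is the Claim_ definition above) =====
theorem group_by_decode_key_py_spec : Claim_equal_group_by_decode_key_py := by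
  intro keys exprs _ hpre
  unfold Spec_group_by_decode_key_py group_by_decode_key_py group_by_decode_key_py_alt
  rcases eq_or_ne keys [] with hk | hk
  · subst hk
    rfl
  · rw [if_neg hk]
    have hlen : ∀ e ∈ exprs, 1 ≤ e.length ∧ (e.length < 3 → ∀ k ∈ keys, k = e.headD "") := by
      rcases hpre with h | h
      · exact absurd h hk
      · exact h
    have hB : (fun (d : PySem.Dict String (PySem.Set (List String))) k =>
        d.insert k ((pvIndex exprs).getD k PySem.Set.empty))
        = (fun d k => d.insert k (pvV exprs k)) := by
      funext d k
      rw [pv_getD_pvIndex]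
    show (keys.foldl (fun g k =>
        let g1 := if g.contains k then g else g.insert k PySem.Set.empty
        exprs.foldl (fun g2 e =>
          if (PySem.List.pyGet? e 0 == some k) || (PySem.List.pyGet? e 2 == some k) then
            PySem.Dict.modify g2 k PySem.Set.empty (fun s => PySem.Set.add s e)
          else g2) g1) PySem.Dict.empty).items
      = (keys.foldl (fun d k =>
          d.insert k ((pvIndex exprs).getD k PySem.Set.empty)) PySem.Dict.empty).items
    rw [hB, pv_main exprs keys PySem.Dict.empty (by simp [PySem.Dict.keys_empty])
          (by intro p hp; simp [PySem.Dict.empty] at hp) hlen]
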